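-- pv_equiv track=rewrite | github.com/cenhao/coding | hackerrank/contest/w38/minute_to_win_it.py | minuteToWinIt
-- ===== SOURCE A (Python) =====
-- def minuteToWinIt(a, k):
--     hm = {}
--     for i, v in enumerate(a):
--         vv = v - k * i
--         if vv not in hm: hm[vv] = 0
--         hm[vv] += 1
--
--     mx = 0
--     for k, v in hm.items():
--         mx = max(mx, v)
--
--     return len(a) - mx
-- ===== SOURCE B (Python) =====
-- def minuteToWinIt(a, k):
--     t = sorted(v - k * i for i, v in enumerate(a))
--     best = 0
--     run = 0
--     prev = None
--     for x in t:
--         run = run + 1 if prev == x else 1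
--         best = max(best, run)
--         prev = x
--     return len(a) - best
-- ===== Notes on version B (the rewrite author's own statement) =====
-- stated objective: alternative
-- what changed: Replaces the hash-map frequency count with sort-then-scan: sort the transformed values v-k*i and find the longest run of equal consecutive elements in one linear pass; the result is len(a) minus that run.
import Mathlib
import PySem

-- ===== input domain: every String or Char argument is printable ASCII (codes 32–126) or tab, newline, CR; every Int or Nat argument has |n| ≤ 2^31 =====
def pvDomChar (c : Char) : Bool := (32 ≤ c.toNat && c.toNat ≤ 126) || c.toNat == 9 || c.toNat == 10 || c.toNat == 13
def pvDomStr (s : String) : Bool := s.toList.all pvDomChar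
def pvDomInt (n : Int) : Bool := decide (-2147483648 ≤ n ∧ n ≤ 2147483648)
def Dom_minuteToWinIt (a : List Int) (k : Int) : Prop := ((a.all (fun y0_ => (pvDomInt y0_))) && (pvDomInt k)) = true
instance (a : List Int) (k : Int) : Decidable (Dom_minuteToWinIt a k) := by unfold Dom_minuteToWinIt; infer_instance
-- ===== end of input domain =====

-- B replaces A's hash-map frequency count by sort-then-scan: sort the transformed values
-- v - k*i and take the longest run of equal consecutive elements (objective: alternative).

-- ===== PORT A =====
def minuteToWinIt (a : List Int) (k : Int) : Int :=
  let hm := (PySem.List.enumerate a).foldl (fun hm iv =>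
      let vv := iv.2 - k * iv.1
      let hm1 := if hm.contains vv then hm else hm.insert vv 0
      hm1.insert vv (hm1.getD vv 0 + 1)) PySem.Dict.empty
  let mx := hm.items.foldl (fun mx kv => max mx kv.2) 0
  (a.length : Int) - mx

-- ===== PORT B =====
def minuteToWinIt_alt (a : List Int) (k : Int) : Int :=
  let t := PySem.List.sorted ((PySem.List.enumerate a).map (fun iv => iv.2 - k * iv.1)) (fun x => x) false
  let st := t.foldl (fun (st : Int × Int × Option Int) x =>
      let run := if st.2.2 = some x then st.2.1 + 1 else 1
      (max st.1 run, run, some x)) (0, 0, none)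
  (a.length : Int) - st.1

-- ===== PRECONDITION & SPEC =====
def Spec_minuteToWinIt (a : List Int) (k : Int) (out : Int) : Prop := out = minuteToWinIt_alt a k
instance (a : List Int) (k : Int) (out : Int) : Decidable (Spec_minuteToWinIt a k out) := by unfold Spec_minuteToWinIt; infer_instance

-- ===== CLAIM (what is proved, stated in full; the proofs are below) =====
def Claim_equal_minuteToWinIt : Prop := ∀ (a : List Int) (k : Int), Dom_minuteToWinIt a k → Spec_minuteToWinIt a k (minuteToWinIt a k)

-- ===== LEMMAS AND PROOFS =====

-- running max over the counts (in t) of the values listed in s: A's second loop after items_counter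
def pvMaxCount (t s : List Int) : Int := s.foldl (fun m y => max m ((t.count y : Int))) 0

-- B's loop step, named for the proofs
def pvBStep : (Int × Int × Option Int) → Int → (Int × Int × Option Int) := fun st x =>
  let run := if st.2.2 = some x then st.2.1 + 1 else 1
  (max st.1 run, run, some x)

lemma pvMaxCount_pull (t : List Int) : ∀ (s : List Int) (a b : Int),
    s.foldl (fun m y => max m ((t.count y : Int))) (max a b)
      = max a (s.foldl (fun m y => max m ((t.count y : Int))) b) := by
  intro s
  induction s with
  | nil => intro a b; rfl
  | cons y s ih => intro a b; simp only [List.foldl_cons, max_assoc]; exact ih a _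

lemma pvFoldMax_perm (c : List Int → Int → Int) (t : List Int) {s s' : List Int} (h : s.Perm s') (init : Int) :
    s.foldl (fun m y => max m (c t y)) init = s'.foldl (fun m y => max m (c t y)) init := by
  haveI : RightCommutative (fun (m : Int) y => max m (c t y)) := ⟨by intro a b1 b2; simp [max_assoc, max_comm (c t b1)]⟩
  exact h.foldl_eq init

-- pvMaxCount over the distinct values depends only on the multiset of values
lemma pvMaxCount_perm {t t' : List Int} (h : t.Perm t') :
    pvMaxCount t (PySem.Set.ofList t) = pvMaxCount t' (PySem.Set.ofList t') := by
  unfold pvMaxCount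
  have hstep : (fun (m : Int) (y : Int) => max m ((t.count y : Int)))
      = (fun (m : Int) (y : Int) => max m ((t'.count y : Int))) := by
    funext m y
    rw [h.count_eq]
  rw [hstep]
  exact pvFoldMax_perm (fun u y => (u.count y : Int)) t'
    ((List.perm_ext_iff_of_nodup (PySem.Set.nodup_ofList t) (PySem.Set.nodup_ofList t')).2
      (fun y => by rw [PySem.Set.mem_ofList, PySem.Set.mem_ofList, h.mem_iff])) 0

-- A-side decomposition of the max-of-counts over the distinct values
lemma pvMaxCount_cons (x : Int) (xs : List Int) :
    pvMaxCount (x :: xs) (PySem.Set.ofList (x :: xs))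
      = max (((x :: xs).count x : Int))
          (pvMaxCount (xs.filter (fun y => y ≠ x)) (PySem.Set.ofList (xs.filter (fun y => y ≠ x)))) := by
  unfold pvMaxCount
  rw [PySem.Set.ofList_cons, List.foldl_cons]
  have hcongr : ∀ (acc : Int), ∀ y ∈ (PySem.Set.ofList xs).discard x,
      (fun m y => max m (((x :: xs).count y : Int))) acc y
        = (fun m y => max m (((xs.filter (fun y => y ≠ x)).count y : Int))) acc y := by
    intro acc y hy
    rcases (PySem.Set.mem_discard (PySem.Set.ofList xs) x y).1 hy with ⟨hy1, hy2⟩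
    have : (x :: xs).count y = (xs.filter (fun y => y ≠ x)).count y := by
      rw [List.count_cons]
      rw [List.count_filter (by simp [hy2])]
      simp [Ne.symm hy2]
    simp [this]
  rw [PySem.List.foldl_congr_mem _ _ _ _ hcongr]
  have hperm : ((PySem.Set.ofList xs).discard x).Perm (PySem.Set.ofList (xs.filter (fun y => y ≠ x))) := by
    rw [List.perm_ext_iff_of_nodup (PySem.Set.nodup_discard _ _ (PySem.Set.nodup_ofList xs)) (PySem.Set.nodup_ofList _)]
    intro y
    rw [PySem.Set.mem_discard, PySem.Set.mem_ofList, PySem.Set.mem_ofList, List.mem_filter]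
    simp
  rw [pvFoldMax_perm (fun t y => (t.count y : Int)) _ hperm]
  rw [max_comm (0 : Int), pvMaxCount_pull]

-- the master invariant for B's run-scan on a sorted list
lemma pvRun_invariant : ∀ (l : List Int) (b r p : Int),
    l.Pairwise (· ≤ ·) → (∀ x ∈ l, p ≤ x) → 0 ≤ r → r ≤ b →
    (l.foldl pvBStep (b, r, some p)).1
      = max b (max (r + (l.count p : Int))
          (pvMaxCount (l.filter (fun y => y ≠ p)) (PySem.Set.ofList (l.filter (fun y => y ≠ p))))) := by
  intro l
  induction l with
  | nil =>
      intro b r p _ _ hr hrb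
      simp [pvMaxCount, PySem.Set.ofList]
      omega
  | cons x xs ih =>
      intro b r p hsort hp hr hrb
      rcases List.pairwise_cons.1 hsort with ⟨hx, hsort'⟩
      by_cases hxp : x = p
      · subst hxp
        have step : pvBStep (b, r, some x) x = (max b (r + 1), r + 1, some x) := by
          simp [pvBStep]
        rw [List.foldl_cons, step]
        rw [ih (max b (r + 1)) (r + 1) x hsort' hx (by omega) (le_max_right _ _)]
        have hcount : (x :: xs).count x = xs.count x + 1 := List.count_cons_self
        have hfilter : (x :: xs).filter (fun y => y ≠ x) = xs.filter (fun y => y ≠ x) := by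
          simp
        rw [hfilter, hcount]
        have hc : (0 : Int) ≤ (xs.count x : Int) := by positivity
        push_cast
        omega
      · -- x ≠ p : every element of x :: xs exceeds p
        have hpx : p < x := lt_of_le_of_ne (hp x (by simp)) (fun h => hxp h.symm)
        have hall : ∀ y ∈ (x :: xs), p < y := by
          intro y hy
          rcases List.mem_cons.1 hy with h | h
          · omega
          · exact lt_of_lt_of_le hpx (hx y h)
        have hcount0 : (x :: xs).count p = 0 := by
          rw [List.count_eq_zero]
          intro hmem
          exact absurd rfl (ne_of_gt (hall p hmem))
        have hfilter : (x :: xs).filter (fun y => y ≠ p) = x :: xs := by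
          rw [List.filter_eq_self]
          intro y hy
          simp [ne_of_gt (hall y hy)]
        have step : pvBStep (b, r, some p) x = (max b 1, 1, some x) := by
          have hne : p ≠ x := Ne.symm hxp
          simp [pvBStep, hne]
        rw [List.foldl_cons, step]
        rw [ih (max b 1) 1 x hsort' hx (by omega) (le_max_right _ _)]
        rw [hcount0, hfilter, pvMaxCount_cons]
        have h2 : (x :: xs).count x = xs.count x + 1 := List.count_cons_self
        rw [h2]
        push_cast
        omega

-- A's guarded dict update is the Counter update over the transformed values
lemma pvDict_eq_counter (k : Int) (l : List (Int × Int)) :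
    l.foldl (fun (d : PySem.Dict Int Int) iv =>
        let vv := iv.2 - k * iv.1
        let d1 := if d.contains vv then d else d.insert vv 0
        d1.insert vv (d1.getD vv 0 + 1)) PySem.Dict.empty
      = PySem.Dict.counter (l.map (fun iv => iv.2 - k * iv.1)) := by
  rw [PySem.List.foldl_congr_mem _ _
     (fun (d : PySem.Dict Int Int) iv => d.insert (iv.2 - k * iv.1) (d.getD (iv.2 - k * iv.1) 0 + 1)) _
     (by
        intro d iv _
        by_cases h : d.contains (iv.2 - k * iv.1)
        · simp [h]
        · simp only [h, Bool.false_eq_true, if_false]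
          rw [PySem.Dict.getD_insert_self, PySem.Dict.insert_insert_self,
              PySem.Dict.getD_of_not_contains _ _ (by simpa using h)])]
  rw [← PySem.Dict.foldl_insert_getD_add_one_eq_counter, List.foldl_map]

-- A's second loop over the Counter's items is pvMaxCount
lemma pvItems_max (l : List Int) :
    (PySem.Dict.counter l).items.foldl (fun mx (kv : Int × Int) => max mx kv.2) 0
      = pvMaxCount l (PySem.Set.ofList l) := by
  rw [PySem.Dict.items_counter, List.foldl_map]
  rfl

-- ===== VERDICT (by name: the statement is the Claim_ definition above) =====
theorem minuteToWinIt_spec : Claim_equal_minuteToWinIt := by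
  intro a k _
  unfold Spec_minuteToWinIt minuteToWinIt minuteToWinIt_alt
  simp only []
  rw [pvDict_eq_counter, pvItems_max]
  have hB : (PySem.List.sorted ((PySem.List.enumerate a).map (fun iv => iv.2 - k * iv.1)) (fun x => x) false).foldl
      (fun (st : Int × Int × Option Int) x =>
        let run := if st.2.2 = some x then st.2.1 + 1 else 1
        (max st.1 run, run, some x)) (0, 0, none)
      = (PySem.List.sorted ((PySem.List.enumerate a).map (fun iv => iv.2 - k * iv.1)) (fun x => x) false).foldl
          pvBStep (0, 0, none) := rfl
  rw [hB]
  set t0 := (PySem.List.enumerate a).map (fun iv => iv.2 - k * iv.1) with ht0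
  set t := PySem.List.sorted t0 (fun x => x) false with ht
  have hperm : t.Perm t0 := PySem.List.sorted_perm t0 (fun x => x) false
  rw [pvMaxCount_perm hperm.symm]
  have hpair : t.Pairwise (· ≤ ·) := by
    have := PySem.List.sorted_pairwise t0 (fun x => x)
    simpa using this
  cases htl : t with
  | nil => simp [pvMaxCount, PySem.Set.ofList]
  | cons x xs =>
      rw [htl] at hpair
      rcases List.pairwise_cons.1 hpair with ⟨hx, hpair'⟩
      have step0 : pvBStep (0, 0, none) x = (1, 1, some x) := by simp [pvBStep]
      rw [List.foldl_cons, step0]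
      rw [pvRun_invariant xs 1 1 x hpair' hx (by omega) (le_refl 1)]
      rw [pvMaxCount_cons]
      have h2 : (x :: xs).count x = xs.count x + 1 := List.count_cons_self
      rw [h2]
      push_cast
      omega
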